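-- pv_equiv track=rewrite | github.com/nikJ13/AoC-2023 | 15 b.py | calculateVal
-- ===== SOURCE A (Python) =====
-- def calculateVal(string):
--     val = 0
--     for ch in string:
--         if ch=='=' or ch=='-':
--             break
--         temp = ord(ch)
--         val += temp
--         val *= 17
--         val = val % 256
--     return val
-- ===== SOURCE B (Python) =====
-- def calculateVal(string):
--     # Phase 1: locate the first '='/'-' delimiter (or the end of the string).
--     n = next((i for i, c in enumerate(string) if c in '=-'), len(string))
--     # Phase 2: closed-form weighted sum: result = sum(ord(c_i) * 17^(n-i)) mod 256.
--     total = 0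
--     for i, ch in enumerate(string[:n]):
--         total += ord(ch) * pow(17, n - i, 256)
--     return total % 256
-- ===== Notes on version B (the rewrite author's own statement) =====
-- stated objective: alternative
-- what changed: Replaced A's single rolling-hash loop with break by two phases: find the index n of the first delimiter, then compute the closed-form weighted sum sum(ord(c_i)*pow(17, n-i, 256)) over string[:n] reduced mod 256 once, instead of the step-by-step recurrence val=(val+ord)*17%256.
import Mathlib
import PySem

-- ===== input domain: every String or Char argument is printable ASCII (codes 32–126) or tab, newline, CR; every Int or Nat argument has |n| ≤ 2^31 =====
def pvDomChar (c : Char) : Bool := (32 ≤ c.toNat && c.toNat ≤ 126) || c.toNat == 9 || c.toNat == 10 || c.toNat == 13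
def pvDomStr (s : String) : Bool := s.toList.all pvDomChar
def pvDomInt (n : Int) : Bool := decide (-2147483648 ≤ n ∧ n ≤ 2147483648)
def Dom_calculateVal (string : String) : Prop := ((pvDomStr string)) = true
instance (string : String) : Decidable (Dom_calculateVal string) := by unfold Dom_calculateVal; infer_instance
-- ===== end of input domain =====

-- B replaces A's single rolling loop with an embedded break by a delimiter-search phase plus a
-- closed-form weighted sum sum(ord(c_i)*17^(n-i)) mod 256 using modular exponentiation (alternative).


-- ===== PORT A =====
-- A: one loop over the characters, rolling val = ((val + ord ch) * 17) % 256, break at '='/'-'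
def calcLoopA : List Char → Int → Int
  | [], val => val
  | ch :: rest, val =>
    if ch = '=' ∨ ch = '-' then val
    else calcLoopA rest (PySem.Int.mod ((val + (ch.toNat : Int)) * 17) 256)

def calculateVal (string : String) : Int := calcLoopA string.toList 0

-- ===== PORT B =====
-- B: phase 1 finds the first delimiter index n (next(... enumerate ...) = findIdx?, default len);
-- B: phase 2 sums ord(c_i) * pow(17, n-i, 256) over string[:n] and reduces mod 256 once
def calculateVal_alt (string : String) : Int :=
  let l := string.toList
  let n : Nat := (l.findIdx? (fun c => c == '=' || c == '-')).getD l.length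
  let pre := l.take n
  PySem.Int.mod
    ((PySem.List.enumerate pre).foldl
      (fun total p => total + (p.2.toNat : Int) * PySem.Int.powMod 17 (n - p.1.toNat) 256) 0)
    256

-- ===== PRECONDITION & SPEC =====
def Spec_calculateVal (string : String) (out : Int) : Prop := out = calculateVal_alt string
instance (string : String) (out : Int) : Decidable (Spec_calculateVal string out) := by unfold Spec_calculateVal; infer_instance

-- ===== CLAIM (what is proved, stated in full; the proofs are below) =====
def Claim_equal_calculateVal : Prop := ∀ (string : String), Dom_calculateVal string → Spec_calculateVal string (calculateVal string)

-- ===== LEMMAS AND PROOFS =====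

lemma modP (x : Int) : PySem.Int.mod x 256 = x % 256 := by
  rw [PySem.Int.mod_eq_emod_of_pos]; norm_num

-- the weighted sum of a (delimiter-free) prefix: W (c :: t) counts c with weight 17^(|t|+1)
def W : List Char → Int
  | [] => 0
  | c :: t => (c.toNat : Int) * 17 ^ (t.length + 1) + W t

-- A's loop never breaks on a delimiter-free list and computes the weighted sum mod 256
lemma calcLoopA_eq_W (p : List Char) (hp : ∀ c ∈ p, ¬(c = '=' ∨ c = '-')) :
    ∀ v : Int, calcLoopA p (v % 256) = (v * 17 ^ p.length + W p) % 256 := by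
  induction p with
  | nil => intro v; simp [calcLoopA, W]
  | cons c t ih =>
    intro v
    have hc : ¬(c = '=' ∨ c = '-') := hp c (List.mem_cons_self)
    have key : PySem.Int.mod ((v % 256 + (c.toNat : Int)) * 17) 256
        = ((v + (c.toNat : Int)) * 17) % 256 := by
      rw [modP]; omega
    rw [calcLoopA, if_neg hc, key, ih (fun x hx => hp x (List.mem_cons_of_mem _ hx))]
    congr 1
    simp only [W, List.length_cons]
    ring

-- A's loop only sees the prefix before the first delimiter
lemma calcLoopA_takeWhile (l : List Char) :
    ∀ v, calcLoopA l v = calcLoopA (l.takeWhile (fun c => !(c == '=' || c == '-'))) v := by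
  induction l with
  | nil => intro v; rfl
  | cons c t ih =>
    intro v
    by_cases hc : c = '=' ∨ c = '-'
    · have hb : (!(c == '=' || c == '-')) = false := by
        rcases hc with h | h <;> simp [h]
      rw [List.takeWhile_cons, hb]
      simp [calcLoopA, hc]
    · push Not at hc
      have hb : (!(c == '=' || c == '-')) = true := by simp [hc.1, hc.2]
      rw [List.takeWhile_cons, hb]
      simp only [if_true]
      rw [calcLoopA, calcLoopA, if_neg (by tauto), if_neg (by tauto), ih]

-- the delimiter index found by B is the length of the delimiter-free prefix
lemma findIdx?_eq_length_takeWhile (l : List Char) :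
    ((l.findIdx? (fun c => c == '=' || c == '-')).getD l.length)
      = (l.takeWhile (fun c => !(c == '=' || c == '-'))).length := by
  induction l with
  | nil => rfl
  | cons c t ih =>
    by_cases hc : (c == '=' || c == '-') = true
    · have hb : (!(c == '=' || c == '-')) = false := by simp [hc]
      rw [List.findIdx?_cons, if_pos hc, List.takeWhile_cons, hb]
      simp
    · have hb : (!(c == '=' || c == '-')) = true := by simp_all
      rw [List.findIdx?_cons, if_neg hc, List.takeWhile_cons, hb]
      simp only [if_true, List.length_cons]
      cases h : t.findIdx? (fun c => c == '=' || c == '-') with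
      | none =>
        rw [h] at ih
        simp only [Option.getD_none] at ih
        simp only [Option.map_none, Option.getD_none, ih]
      | some k =>
        rw [h] at ih
        simp only [Option.getD_some] at ih
        simp only [Option.map_some, Option.getD_some, ih]

-- B's weighted sum over the enumerated prefix equals W mod 256
lemma sumB (p : List Char) : ∀ (s n : Nat), s + p.length = n →
    ((PySem.List.enumerate p (s : Int)).map
        (fun q => (q.2.toNat : Int) * PySem.Int.powMod 17 (n - q.1.toNat) 256)).sum % 256
      = W p % 256 := by
  induction p with
  | nil => intro s n _; simp [PySem.List.enumerate, W]
  | cons c t ih =>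
    intro s n hn
    have hn' : s + (t.length + 1) = n := by simpa using hn
    rw [PySem.List.enumerate_cons, List.map_cons, List.sum_cons]
    simp only [Int.toNat_natCast]
    have hexp : n - s = t.length + 1 := by omega
    have hs1 : ((s : Int) + 1) = ((s + 1 : Nat) : Int) := by push_cast; ring
    have hrec := ih (s + 1) n (by omega)
    rw [hexp, hs1]
    have hpw : PySem.Int.powMod 17 (t.length + 1) 256 = (17 : Int) ^ (t.length + 1) % 256 := by
      simp [PySem.Int.powMod]
    rw [hpw, W]
    rw [Int.add_emod, hrec, Int.mul_emod, Int.emod_emod_of_dvd _ dvd_rfl, ← Int.mul_emod,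
      ← Int.add_emod]

-- ===== VERDICT (by name: the statement is the Claim_ definition above) =====
theorem calculateVal_spec : Claim_equal_calculateVal := by
  intro s _
  unfold Spec_calculateVal
  simp only [calculateVal, calculateVal_alt]
  set l := s.toList with hl
  set T := l.takeWhile (fun c => !(c == '=' || c == '-')) with hT
  have hn : ((l.findIdx? (fun c => c == '=' || c == '-')).getD l.length) = T.length :=
    findIdx?_eq_length_takeWhile l
  have hpre : l.take T.length = T := (List.prefix_iff_eq_take.mp (List.takeWhile_prefix _)).symm
  simp only [hn, hpre]
  -- A side
  have hA : calcLoopA l 0 = W T % 256 := by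
    have h0 : (0 : Int) = 0 % 256 := by norm_num
    rw [calcLoopA_takeWhile l 0, ← hT, h0,
      calcLoopA_eq_W T (by
        intro c hc
        have := List.mem_takeWhile_imp hc
        simp at this
        tauto) 0]
    norm_num
  -- B side
  have hB := sumB T 0 T.length (by simp)
  rw [hA, modP, PySem.List.foldl_add]
  simpa using hB.symm
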